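-- pv_equiv track=rewrite | github.com/mayank93/Twitter-Sentiment-Analysis | front-end/web2py/applications/TSAA/modules/PhraseLevel/code/preProcessing.py | replaceRepetition
-- ===== SOURCE A (Python) =====
-- specialChar='1234567890@#%^&()_=`{}:"|[]\;\',./\n\t\r '
--
-- def replaceRepetition(tweet):
--     """takes as input a list which contains words in tweet and return list of words in tweet after replacement and numner of repetion
--        eg coooooooool -> coool """
--     count=0
--     for i in range(len(tweet)):
--         x=list(tweet[i])
--         if len(x)>3:
--             flag=0
--             for j in range(3,len(x)):
--                 if(x[j-3].lower()==x[j-2].lower()==x[j-1].lower()==x[j].lower()):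
--                     x[j-3]=''
--                     if flag==0:
--                         count+=1
--                         flag=1
--             tweet[i]=''.join(x).strip(specialChar)
--
--     return tweet,count
-- ===== SOURCE B (Python) =====
-- specialChar='1234567890@#%^&()_=`{}:"|[]\;\',./\n\t\r '
--
-- def replaceRepetition(tweet):
--     """takes as input a list which contains words in tweet and return list of words in tweet after replacement and numner of repetion
--        eg coooooooool -> coool """
--     count = 0
--     for i, word in enumerate(tweet):
--         if len(word) <= 3:
--             continue
--         pieces = []
--         collapsed = False
--         k = 0
--         n = len(word)
--         while k < n:
--             j = k + 1
--             while j < n and word[j].lower() == word[k].lower():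
--                 j += 1
--             run = word[k:j]
--             if len(run) > 3:
--                 collapsed = True
--                 run = run[-3:]
--             pieces.append(run)
--             k = j
--         if collapsed:
--             count += 1
--         tweet[i] = ''.join(pieces).strip(specialChar)
--     return tweet, count
-- ===== Notes on version B (the rewrite author's own statement) =====
-- stated objective: idiomatic
-- what changed: B rebuilds each long word from maximal case-insensitive runs (keeping the last 3 characters of any run longer than 3) in one forward scan, instead of A's sliding 4-character window that blanks list cells in place.
import Mathlib
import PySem

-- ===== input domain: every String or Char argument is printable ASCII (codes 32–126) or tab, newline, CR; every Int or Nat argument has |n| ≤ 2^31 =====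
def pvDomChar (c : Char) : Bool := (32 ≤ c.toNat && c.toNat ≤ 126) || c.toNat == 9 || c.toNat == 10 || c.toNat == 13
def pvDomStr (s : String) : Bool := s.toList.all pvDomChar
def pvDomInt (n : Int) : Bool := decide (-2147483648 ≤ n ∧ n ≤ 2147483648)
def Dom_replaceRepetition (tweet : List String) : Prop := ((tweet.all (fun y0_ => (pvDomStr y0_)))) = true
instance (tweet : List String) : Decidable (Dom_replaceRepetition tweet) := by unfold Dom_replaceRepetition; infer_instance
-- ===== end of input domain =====

-- B collapses each long word by one scan over its maximal case-insensitive runs (keeping the last 3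
-- chars of a run longer than 3) instead of A's sliding 4-char window that blanks cells in place;
-- same cost, more direct. A mutates the input list in place in Python; the equivalence proved here
-- is about the RETURN value (B performs the same in-place mutation in Python).

-- ===== PORT A =====
def specialChar : String := "1234567890@#%^&()_=`{}:\"|[]\\;',./\n\t\r "

-- one iteration of A's inner loop 'for j in range(3, len(x))'; a cell x[k] is a List Char
-- ('' after blanking = []), x[k].lower() is PySem.Chars.lower on the cell
def pvAInner (st : List (List Char) × Bool × Int) (j : ℕ) : List (List Char) × Bool × Int :=
  let (x, flag, count) := st
  if PySem.Chars.lower (x.getD (j-3) []) == PySem.Chars.lower (x.getD (j-2) []) &&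
     PySem.Chars.lower (x.getD (j-2) []) == PySem.Chars.lower (x.getD (j-1) []) &&
     PySem.Chars.lower (x.getD (j-1) []) == PySem.Chars.lower (x.getD j []) then
    let count := if flag == false then count + 1 else count
    (x.set (j-3) [], true, count)
  else (x, flag, count)

-- A's body for one word of the outer 'for i in range(len(tweet))' loop (tweet[i] assignment = append)
def pvAStep (st : List String × Int) (w : String) : List String × Int :=
  let (acc, count) := st
  let x : List (List Char) := w.toList.map (fun c => [c])    -- x = list(tweet[i])
  if x.length > 3 then
    -- range(3, len(x)) = List.range' 3 (len - 3)
    let (x, _flag, count) := (List.range' 3 (x.length - 3)).foldl pvAInner (x, false, count)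
    (acc ++ [PySem.Str.stripChars (String.ofList x.flatten) specialChar], count)
  else (acc ++ [w], count)

def replaceRepetition (tweet : List String) : List String × Int :=
  tweet.foldl pvAStep ([], 0)

-- ===== PORT B =====
-- Source B's run scan: the inner 'while j < n and word[j].lower() == word[k].lower()' is the takeWhile,
-- 'run[-3:]' (len(run) > 3) is run.drop (run.length - 3); pieces are collected front to back
def pvBCollect : List Char → List (List Char) × Bool
  | [] => ([], false)
  | c :: rest =>
    let r := rest.takeWhile (fun d => PySem.Chars.lowerChar d == PySem.Chars.lowerChar c)
    let rest' := rest.drop r.length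
    let run := c :: r
    let (ps, coll) := pvBCollect rest'
    if run.length > 3 then ((run.drop (run.length - 3)) :: ps, true)
    else (run :: ps, coll)
termination_by cs => cs.length
decreasing_by simp [List.length_drop]

def pvBStep (st : List String × Int) (w : String) : List String × Int :=
  let (acc, count) := st
  if w.toList.length ≤ 3 then (acc ++ [w], count)    -- continue: word left unchanged
  else
    let (ps, coll) := pvBCollect w.toList
    let count := if coll then count + 1 else count
    (acc ++ [PySem.Str.stripChars (String.ofList ps.flatten) specialChar], count)

def replaceRepetition_alt (tweet : List String) : List String × Int :=
  tweet.foldl pvBStep ([], 0)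

-- ===== PRECONDITION & SPEC =====
def Spec_replaceRepetition (tweet : List String) (out : List String × Int) : Prop := out = replaceRepetition_alt tweet
instance (tweet : List String) (out : List String × Int) : Decidable (Spec_replaceRepetition tweet out) := by unfold Spec_replaceRepetition; infer_instance

-- ===== CLAIM (what is proved, stated in full; the proofs are below) =====
def Claim_equal_replaceRepetition : Prop := ∀ (tweet : List String), Dom_replaceRepetition tweet → Spec_replaceRepetition tweet (replaceRepetition tweet)

-- ===== LEMMAS AND PROOFS =====
def low (c : Char) : Char := PySem.Chars.lowerChar c
def eq4 (cs : List Char) (k : ℕ) : Bool :=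
  (low (cs.getD k ' ') == low (cs.getD (k+1) ' ')) &&
  (low (cs.getD (k+1) ' ') == low (cs.getD (k+2) ' ')) &&
  (low (cs.getD (k+2) ' ') == low (cs.getD (k+3) ' '))
def blanked (cs : List Char) (m : ℕ) : List (List Char) :=
  cs.mapIdx (fun k c => if k < m ∧ eq4 cs k = true then [] else [c])
def anyB (cs : List Char) (m : ℕ) : Bool := (List.range m).any (fun k => eq4 cs k)

theorem blanked_zero (cs : List Char) : blanked cs 0 = cs.map (fun c => [c]) := by
  apply List.ext_getElem <;> simp [blanked]

theorem blanked_getD_of_ge (cs : List Char) (m k : ℕ) (hk : m ≤ k) (hlt : k < cs.length) :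
    (blanked cs m).getD k [] = [cs.getD k ' '] := by
  rw [List.getD_eq_getElem _ _ (by simp [blanked]; omega), List.getD_eq_getElem _ _ hlt]
  simp [blanked]
  omega

theorem blanked_set (cs : List Char) (m : ℕ) (h : eq4 cs m = true) :
    (blanked cs m).set m [] = blanked cs (m+1) := by
  apply List.ext_getElem
  · simp [blanked]
  · intro k h1 h2
    simp only [blanked, List.getElem_set, List.getElem_mapIdx]
    by_cases hk : k = m
    · subst hk; simp [h]
    · rw [if_neg (Ne.symm hk)]
      have : (k < m ∧ eq4 cs k = true) ↔ (k < m + 1 ∧ eq4 cs k = true) := by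
        constructor <;> (rintro ⟨h3, h4⟩; exact ⟨by omega, h4⟩)
      rw [if_congr this rfl rfl]

theorem blanked_stall (cs : List Char) (m : ℕ) (h : eq4 cs m = false) :
    blanked cs m = blanked cs (m+1) := by
  apply List.ext_getElem
  · simp [blanked]
  · intro k h1 h2
    simp only [blanked, List.getElem_mapIdx]
    have : (k < m ∧ eq4 cs k = true) ↔ (k < m + 1 ∧ eq4 cs k = true) := by
      constructor <;> (rintro ⟨h3, h4⟩; refine ⟨?_, h4⟩)
      · omega
      · rcases Nat.lt_succ_iff_lt_or_eq.mp h3 with h | h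
        · exact h
        · subst h; rw [h4] at h; simp at h
    rw [if_congr this rfl rfl]

theorem anyB_succ (cs : List Char) (m : ℕ) : anyB cs (m+1) = (anyB cs m || eq4 cs m) := by
  simp [anyB, List.range_succ]

theorem head?_dropWhile_false {p : Char → Bool} {l : List Char} {e : Char}
    (h : (l.dropWhile p).head? = some e) : p e = false := by
  induction l with
  | nil => simp at h
  | cons a t ih =>
    by_cases hp : p a
    · rw [List.dropWhile_cons_of_pos hp] at h; exact ih h
    · rw [List.dropWhile_cons_of_neg hp] at h
      simp at h; subst h; simpa using hp

theorem lower_single_beq (a b : Char) :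
    (PySem.Chars.lower [a] == PySem.Chars.lower [b]) = (low a == low b) := by
  simp [PySem.Chars.lower, low]

theorem aLoop (cs : List Char) (count : Int) (m : ℕ) (hm : 3 + m ≤ cs.length) :
    (List.range' 3 m).foldl pvAInner (cs.map (fun c => [c]), false, count) =
      (blanked cs m, anyB cs m, count + (if anyB cs m then 1 else 0)) := by
  induction m with
  | zero => simp [anyB, blanked_zero, List.range']
  | succ m ih =>
    have hm' : 3 + m ≤ cs.length := by omega
    rw [List.range'_concat, List.foldl_append, ih hm']
    simp only [List.foldl_cons, List.foldl_nil, Nat.one_mul]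
    show pvAInner _ (3 + m) = _
    unfold pvAInner
    dsimp only
    have e0 : 3 + m - 3 = m := by omega
    have e1 : 3 + m - 2 = m + 1 := by omega
    have e2 : 3 + m - 1 = m + 2 := by omega
    rw [e0, e1, e2,
        blanked_getD_of_ge cs m m le_rfl (by omega),
        blanked_getD_of_ge cs m (m+1) (by omega) (by omega),
        blanked_getD_of_ge cs m (m+2) (by omega) (by omega),
        (by omega : 3 + m = m + 3),
        blanked_getD_of_ge cs m (m+3) (by omega) (by omega),
        lower_single_beq, lower_single_beq, lower_single_beq]
    have hcond : ((low (cs.getD m ' ') == low (cs.getD (m+1) ' ')) &&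
        (low (cs.getD (m+1) ' ') == low (cs.getD (m+2) ' ')) &&
        (low (cs.getD (m+2) ' ') == low (cs.getD (m+3) ' '))) = eq4 cs m := rfl
    rw [hcond]
    by_cases h : eq4 cs m = true
    · rw [if_pos h, blanked_set cs m h, anyB_succ]
      cases hA : anyB cs m <;> simp [h]
    · rw [if_neg h, ← blanked_stall cs m (by simpa using h), anyB_succ]
      simp [Bool.of_not_eq_true h]

def mid : List Char → List Char × Bool
  | [] => ([], false)
  | [a] => ([a], false)
  | [a, b] => ([a, b], false)
  | [a, b, c] => ([a, b, c], false)
  | a :: b :: c :: d :: t =>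
    if low a = low b ∧ low b = low c ∧ low c = low d then ((mid (b :: c :: d :: t)).1, true)
    else (a :: (mid (b :: c :: d :: t)).1, (mid (b :: c :: d :: t)).2)

theorem eq4_cons (a : Char) (l : List Char) (k : ℕ) : eq4 (a :: l) (k+1) = eq4 l k := by
  simp [eq4]

theorem blanked_cons (a : Char) (l : List Char) (m : ℕ) :
    blanked (a :: l) (m+1) = (if eq4 (a :: l) 0 = true then [] else [a]) :: blanked l m := by
  unfold blanked
  rw [List.mapIdx_cons]
  congr 1
  · simp
  · apply List.ext_getElem
    · simp
    · intro k h1 h2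
      simp only [List.getElem_mapIdx, eq4_cons]
      exact if_congr (and_congr_left' Nat.succ_lt_succ_iff) rfl rfl

theorem anyB_cons (a : Char) (l : List Char) (m : ℕ) :
    anyB (a :: l) (m+1) = (eq4 (a :: l) 0 || anyB l m) := by
  simp only [anyB, List.range_succ_eq_map, List.any_cons, List.any_map]
  congr 1

theorem flatten_singletons (l : List Char) : (l.map (fun c => [c])).flatten = l := by
  induction l with
  | nil => simp
  | cons a t ih => simp [ih]

theorem eq4_zero (a b c d : Char) (t : List Char) :
    (eq4 (a :: b :: c :: d :: t) 0 = true) ↔ (low a = low b ∧ low b = low c ∧ low c = low d) := by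
  simp [eq4, and_assoc]

theorem blanked_mid (cs : List Char) :
    (blanked cs (cs.length - 3)).flatten = (mid cs).1 ∧ anyB cs (cs.length - 3) = (mid cs).2 := by
  induction cs using mid.induct with
  | case1 => simp [blanked, anyB, mid]
  | case2 a => simp [show ([a] : List Char).length - 3 = 0 from rfl, blanked_zero,
      flatten_singletons, anyB, mid]
  | case3 a b => simp [show ([a, b] : List Char).length - 3 = 0 from rfl, blanked_zero,
      flatten_singletons, anyB, mid]
  | case4 a b c => simp [show ([a, b, c] : List Char).length - 3 = 0 from rfl, blanked_zero,
      flatten_singletons, anyB, mid]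
  | case5 a b c d t hc ih =>
    obtain ⟨ih1, ih2⟩ := ih
    have hlen2 : (b :: c :: d :: t).length - 3 = t.length := by simp
    rw [hlen2] at ih1 ih2
    rw [show (a :: b :: c :: d :: t).length - 3 = t.length + 1 by simp,
        blanked_cons, anyB_cons, List.flatten_cons, ih1]
    constructor
    · simp [mid, hc, eq4_zero]
    · rw [ih2]; simp [mid, hc, eq4_zero]
  | case6 a b c d t hc ih =>
    obtain ⟨ih1, ih2⟩ := ih
    have hlen2 : (b :: c :: d :: t).length - 3 = t.length := by simp
    rw [hlen2] at ih1 ih2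
    rw [show (a :: b :: c :: d :: t).length - 3 = t.length + 1 by simp,
        blanked_cons, anyB_cons, List.flatten_cons, ih1]
    constructor
    · simp [mid, hc, eq4_zero]
    · rw [ih2]; simp [mid, hc, eq4_zero]

termination_by cs => cs.length
decreasing_by simp [List.length_drop]

theorem mid_run (r : List Char) (c : Char) (rest : List Char)
    (hr : ∀ d ∈ r, low d = low c)
    (hb : ∀ e ∈ rest.head?, low e ≠ low c) :
    mid (c :: (r ++ rest)) =
      ((if r.length + 1 ≤ 3 then c :: r else (c :: r).drop (r.length + 1 - 3)) ++ (mid rest).1,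
       (decide (r.length + 1 > 3) || (mid rest).2)) := by
  induction r generalizing c with
  | nil =>
    simp only [List.nil_append, List.length_nil]
    norm_num
    match rest, hb with
    | [], _ => simp [mid]
    | [e], _ => simp [mid]
    | [e, f], _ => simp [mid]
    | e :: f :: g :: t, hb =>
      have h1 : low e ≠ low c := hb e (by simp)
      have h2 : ¬ (low c = low e ∧ low e = low f ∧ low f = low g) := fun h => h1 h.1.symm
      simp [mid, h2]
  | cons d r' ih =>
    have hdc : low d = low c := hr d (by simp)
    have hr' : ∀ x ∈ r', low x = low d := by
      intro x hx; rw [hdc]; exact hr x (by simp [hx])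
    have hb' : ∀ e ∈ rest.head?, low e ≠ low d := by
      intro e he; rw [hdc]; exact hb e he
    have IH := ih d hr' hb'
    match r', hr with
    | [], hr =>
      -- run c::d, length 2
      match rest, hb with
      | [], _ => simp [mid]
      | [e], _ => simp [mid]
      | e :: f :: t, hb =>
        have hne : low e ≠ low c := hb e (by simp)
        have : ¬ (low c = low d ∧ low d = low e ∧ low e = low f) := by
          rintro ⟨h1, h2, h3⟩; exact hne (h2.symm.trans hdc)
        simp only [List.cons_append, List.nil_append] at IH ⊢
        simp [mid, this, IH]
    | [e], hr =>
      -- run c::d::e, length 3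
      have hec : low e = low c := hr e (by simp)
      match rest, hb with
      | [], _ => simp [mid]
      | f :: t, hb =>
        have hne : low f ≠ low c := hb f (by simp)
        have : ¬ (low c = low d ∧ low d = low e ∧ low e = low f) := by
          rintro ⟨h1, h2, h3⟩; exact hne (h3.symm.trans hec)
        simp only [List.cons_append, List.nil_append] at IH ⊢
        simp [mid, this, IH]
    | e :: f :: r'', hr =>
      -- run length ≥ 4: collapse at the head
      have hec : low e = low c := hr e (by simp)
      have hfc : low f = low c := hr f (by simp)
      have hcond : low c = low d ∧ low d = low e ∧ low e = low f := by
        rw [hdc, hec, hfc]; exact ⟨rfl, rfl, rfl⟩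
      simp only [List.cons_append] at IH ⊢
      rw [show mid (c :: d :: e :: f :: (r'' ++ rest)) = ((mid (d :: e :: f :: (r'' ++ rest))).1, true) by
            simp [mid, hcond]]
      rw [IH]
      rw [Prod.ext_iff]
      refine ⟨?_, ?_⟩
      · show _ ++ _ = _ ++ _
        congr 1
        cases r'' with
        | nil => simp
        | cons g t =>
          rw [if_neg (by simp), if_neg (by simp)]
          simp only [List.length_cons]
          rw [show t.length + 1 + 1 + 1 + 1 - 3 = t.length + 1 from by omega,
              show t.length + 1 + 1 + 1 + 1 + 1 - 3 = t.length + 2 from by omega,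
              List.drop_succ_cons, List.drop_succ_cons, List.drop_succ_cons]
      · show (true : Bool) = _
        simp

theorem drop_takeWhile_length (p : Char → Bool) (l : List Char) :
    l.drop (l.takeWhile p).length = l.dropWhile p := by
  induction l with
  | nil => simp
  | cons a t ih =>
    by_cases hp : p a
    · simp [List.takeWhile_cons_of_pos hp, List.dropWhile_cons_of_pos hp, ih]
    · simp [List.takeWhile_cons_of_neg hp, List.dropWhile_cons_of_neg hp]

theorem bCollect_mid_aux (n : ℕ) : ∀ (cs : List Char), cs.length ≤ n →
    (pvBCollect cs).1.flatten = (mid cs).1 ∧ (pvBCollect cs).2 = (mid cs).2 := by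
  induction n with
  | zero =>
    intro cs h
    have : cs = [] := List.eq_nil_of_length_eq_zero (by omega)
    subst this
    simp [pvBCollect, mid]
  | succ n ih =>
    intro cs hlen
    match cs with
    | [] => simp [pvBCollect, mid]
    | c :: rest =>
      rw [pvBCollect]
      set p : Char → Bool := fun d => PySem.Chars.lowerChar d == PySem.Chars.lowerChar c with hp
      set r := rest.takeWhile p with hrdef
      set rest' := rest.drop r.length with hrest'
      have hsplit : rest = r ++ rest' := by
        rw [hrest', hrdef, drop_takeWhile_length, List.takeWhile_append_dropWhile]
      have hr : ∀ d ∈ r, low d = low c := by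
        intro d hd
        have := List.mem_takeWhile_imp hd
        rw [hp] at this
        simpa [low] using this
      have hb : ∀ e ∈ rest'.head?, low e ≠ low c := by
        intro e he hce
        have hdw : rest' = rest.dropWhile p := by
          rw [hrest', hrdef, drop_takeWhile_length]
        rw [hdw] at he
        have := head?_dropWhile_false (Option.mem_def.mp he)
        rw [hp] at this
        simp [low] at hce
        simp [hce] at this
      have hlen' : rest'.length ≤ n := by
        have h1 : rest'.length ≤ rest.length := by rw [hrest']; simp
        simp at hlen
        omega
      obtain ⟨ihf, ihc⟩ := ih rest' hlen'
      have hmid := mid_run r c rest' hr hb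
      rw [← hsplit] at hmid
      rcases hpc : pvBCollect rest' with ⟨ps, coll⟩
      rw [hpc] at ihf ihc
      dsimp only at ihf ihc
      simp only []
      rw [hmid]
      by_cases h3 : (c :: r).length > 3
      · rw [if_pos h3]
        constructor
        · simp only [List.flatten_cons]
          rw [ihf]
          congr 1
          rw [if_neg (by simp at h3 ⊢; omega)]
          simp
        · simp
          simp at h3
          omega
      · rw [if_neg h3]
        constructor
        · simp only [List.flatten_cons]
          rw [ihf]
          congr 1
          rw [if_pos (by simp at h3 ⊢; omega)]
        · simp
          rw [ihc]
          have hnl : ¬ 3 ≤ r.length := by simp at h3; omega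
          simp [hnl]

theorem bCollect_mid (cs : List Char) :
    (pvBCollect cs).1.flatten = (mid cs).1 ∧ (pvBCollect cs).2 = (mid cs).2 :=
  bCollect_mid_aux cs.length cs le_rfl

theorem step_eq : pvAStep = pvBStep := by
  funext st w
  obtain ⟨acc, count⟩ := st
  unfold pvAStep pvBStep
  dsimp only
  rw [List.length_map]
  by_cases h : w.toList.length > 3
  · rw [if_pos h, if_neg (by omega)]
    have hm : 3 + (w.toList.length - 3) ≤ w.toList.length := by omega
    rw [aLoop w.toList count (w.toList.length - 3) hm]
    dsimp only
    obtain ⟨hbf, hbc⟩ := bCollect_mid w.toList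
    obtain ⟨haf, hac⟩ := blanked_mid w.toList
    rcases hpc : pvBCollect w.toList with ⟨ps, coll⟩
    rw [hpc] at hbf hbc
    dsimp only at hbf hbc
    rw [haf, hac, ← hbf, ← hbc]
    cases coll <;> simp
  · rw [if_neg h, if_pos (by omega)]

-- ===== VERDICT (by name: the statement is the Claim_ definition above) =====
theorem replaceRepetition_spec : Claim_equal_replaceRepetition := by
  intro tweet _
  unfold Spec_replaceRepetition replaceRepetition replaceRepetition_alt
  rw [step_eq]
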